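-- pv_equiv track=rewrite | github.com/bwookwak/ace-appworld | memory_utility/common/playbook.py | render_playbook
-- ===== SOURCE A (Python) =====
-- from typing import Any
--
-- def render_playbook(insights: list[dict[str, Any]], sections_order: list[str] | None = None) -> str:
--     """Render a list of insights back into the `[id] content` text format.
--
--     Insights are grouped by `section`. Section order follows `sections_order`
--     if provided; otherwise sections appear in first-seen order.
--     """
--     by_section: dict[str, list[dict[str, Any]]] = {}
--     section_seen: list[str] = []
--     for ins in insights:
--         sec = ins.get("section") or "OTHERS"
--         if sec not in by_section:
--             by_section[sec] = []
--             section_seen.append(sec)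
--         by_section[sec].append(ins)
--     if sections_order is None:
--         order = section_seen
--     else:
--         order = list(sections_order) + [s for s in section_seen if s not in sections_order]
--     parts: list[str] = []
--     for sec in order:
--         if sec not in by_section:
--             continue
--         parts.append(f"## {sec}")
--         for ins in by_section[sec]:
--             parts.append(f"[{ins['id']}] {ins['text']}")
--         parts.append("")
--     return "\n".join(parts).rstrip() + "\n"
-- ===== SOURCE B (Python) =====
-- def render_playbook(insights, sections_order=None):
--     """Render insights grouped by section, without building a grouping dict:
--     dedup the section names once, then select each section's rows by a fresh filter."""
--     def sec_of(ins):
--         return ins.get("section") or "OTHERS"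
--
--     seen = list(dict.fromkeys(sec_of(ins) for ins in insights))
--     if sections_order is None:
--         order = seen
--     else:
--         order = list(sections_order) + [s for s in seen if s not in sections_order]
--     parts = []
--     for sec in order:
--         group = [ins for ins in insights if sec_of(ins) == sec]
--         if group:
--             parts.append(f"## {sec}")
--             parts.extend(f"[{ins['id']}] {ins['text']}" for ins in group)
--             parts.append("")
--     return "\n".join(parts).rstrip() + "\n"
-- ===== Notes on version B (the rewrite author's own statement) =====
-- stated objective: alternative
-- what changed: B drops A's dict-of-lists grouping pass: it dedups the section names once (dict.fromkeys) and then renders each section in order by a fresh filter over all insights.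
import Mathlib
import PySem

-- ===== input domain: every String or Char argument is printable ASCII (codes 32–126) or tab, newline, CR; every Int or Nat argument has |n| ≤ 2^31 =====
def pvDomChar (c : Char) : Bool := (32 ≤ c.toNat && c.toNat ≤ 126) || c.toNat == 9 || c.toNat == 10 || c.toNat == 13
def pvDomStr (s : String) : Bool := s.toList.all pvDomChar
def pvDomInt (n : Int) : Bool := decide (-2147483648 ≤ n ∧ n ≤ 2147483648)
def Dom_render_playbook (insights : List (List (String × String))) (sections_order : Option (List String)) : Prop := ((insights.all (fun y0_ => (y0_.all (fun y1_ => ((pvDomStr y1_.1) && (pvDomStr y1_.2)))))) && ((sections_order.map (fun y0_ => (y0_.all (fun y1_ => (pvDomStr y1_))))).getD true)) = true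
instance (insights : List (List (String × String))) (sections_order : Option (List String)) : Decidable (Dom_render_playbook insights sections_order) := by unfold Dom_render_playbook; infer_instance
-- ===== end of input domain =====

-- B replaces A's dict-of-lists grouping pass by a dedup of the section names plus a
-- fresh filter over all insights per rendered section (alternative decomposition, same output).

-- ===== PORT A =====
-- shared field accessors:  ins.get("section") or "OTHERS"  and the rendered line  f"[{ins['id']}] {ins['text']}"
-- (ins['id'] / ins['text'] raise KeyError when absent; Pre_ excludes that, so .getD "" is never reached on admitted inputs)
def pvSec (ins : List (String × String)) : String :=
  match (PySem.Dict.ofList ins).get? "section" with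
  | some s => if s = "" then "OTHERS" else s
  | none => "OTHERS"

def pvLine (ins : List (String × String)) : String :=
  "[" ++ ((PySem.Dict.ofList ins).get? "id").getD "" ++ "] " ++ ((PySem.Dict.ofList ins).get? "text").getD ""

def render_playbook (insights : List (List (String × String))) (sections_order : Option (List String)) : String :=
  let st := insights.foldl
    (fun (st : PySem.Dict String (List (List (String × String))) × List String) ins =>
      let sec := pvSec ins
      let st := if st.1.contains sec then st else (st.1.insert sec [], st.2 ++ [sec])
      (st.1.modify sec [] (· ++ [ins]), st.2))
    (PySem.Dict.empty, [])
  let bySection := st.1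
  let order := match sections_order with
    | none => st.2
    | some so => so ++ st.2.filter (fun s => !so.contains s)
  let parts := order.foldl
    (fun parts sec =>
      if bySection.contains sec then
        parts ++ ["## " ++ sec] ++ (bySection.getD sec []).map pvLine ++ [""]
      else parts) []
  PySem.Str.rstrip (PySem.Str.join "\n" parts) ++ "\n"

-- ===== PORT B =====
def render_playbook_alt (insights : List (List (String × String))) (sections_order : Option (List String)) : String :=
  let seen := PySem.List.dedup (insights.map pvSec)
  let order := match sections_order with
    | none => seen
    | some so => so ++ seen.filter (fun s => !so.contains s)
  let parts := order.foldl
    (fun parts sec =>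
      let group := insights.filter (fun ins => pvSec ins == sec)
      if group.isEmpty then parts
      else parts ++ ["## " ++ sec] ++ group.map pvLine ++ [""]) []
  PySem.Str.rstrip (PySem.Str.join "\n" parts) ++ "\n"

-- ===== PRECONDITION & SPEC =====
-- Pre_ excludes exactly the inputs where A raises KeyError: an insight without an "id" or "text" key.
def Pre_render_playbook (insights : List (List (String × String))) (_sections_order : Option (List String)) : Prop :=
  ∀ ins ∈ insights, ((PySem.Dict.ofList ins).get? "id").isSome = true ∧ ((PySem.Dict.ofList ins).get? "text").isSome = true
instance (insights : List (List (String × String))) (sections_order : Option (List String)) : Decidable (Pre_render_playbook insights sections_order) := by unfold Pre_render_playbook; infer_instance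

def pvWitness_render_playbook : (List (List (String × String))) × Option (List String) :=
  ([[("id", "1"), ("text", "hi"), ("section", "A")], [("id", "2"), ("text", "yo")]], some ["B", "A"])

def Spec_render_playbook (insights : List (List (String × String))) (sections_order : Option (List String)) (out : String) : Prop := out = render_playbook_alt insights sections_order
instance (insights : List (List (String × String))) (sections_order : Option (List String)) (out : String) : Decidable (Spec_render_playbook insights sections_order out) := by unfold Spec_render_playbook; infer_instance

-- ===== CLAIM (what is proved, stated in full; the proofs are below) =====
def Claim_equal_render_playbook : Prop := ∀ (insights : List (List (String × String))) (sections_order : Option (List String)), Dom_render_playbook insights sections_order → Pre_render_playbook insights sections_order → Spec_render_playbook insights sections_order (render_playbook insights sections_order)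

-- ===== LEMMAS AND PROOFS =====

-- A's grouping loop, named so it can be reasoned about.
def pvLoopA (l : List (List (String × String)))
    (st : PySem.Dict String (List (List (String × String))) × List String) :
    PySem.Dict String (List (List (String × String))) × List String :=
  l.foldl
    (fun st ins =>
      let sec := pvSec ins
      let st := if st.1.contains sec then st else (st.1.insert sec [], st.2 ++ [sec])
      (st.1.modify sec [] (· ++ [ins]), st.2))
    st

-- the plain modify-fold A's loop amounts to
def pvGroup (l : List (List (String × String)))
    (d : PySem.Dict String (List (List (String × String)))) :
    PySem.Dict String (List (List (String × String))) :=
  l.foldl (fun d ins => d.modify (pvSec ins) [] (· ++ [ins])) d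

lemma pvLoopA_eq (l : List (List (String × String)))
    (d : PySem.Dict String (List (List (String × String)))) (seen : List String)
    (h : seen = d.keys) :
    pvLoopA l (d, seen) = (pvGroup l d, (pvGroup l d).keys) := by
  induction l generalizing d seen with
  | nil => simp [pvLoopA, pvGroup, h]
  | cons ins tl ih =>
    simp only [pvLoopA, pvGroup, List.foldl_cons] at *
    by_cases hc : d.contains (pvSec ins) = true
    · simp only [hc, if_true]
      exact ih _ _ (by simp [PySem.Dict.keys_modify, h,
        PySem.Dict.keys_insert_of_contains _ _ hc])
    · simp only [Bool.not_eq_true] at hc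
      simp only [hc, Bool.false_eq_true, if_false]
      have hd : (d.insert (pvSec ins) []).modify (pvSec ins) [] (· ++ [ins])
          = d.modify (pvSec ins) [] (· ++ [ins]) := by
        simp [PySem.Dict.modify, PySem.Dict.getD_insert_self,
          PySem.Dict.insert_insert_self, PySem.Dict.getD_of_not_contains _ _ hc]
      rw [hd]
      exact ih _ _ (by simp [PySem.Dict.keys_modify, h,
        PySem.Dict.keys_insert_of_not_contains _ _ hc])
  
lemma pvGroup_getD (l : List (List (String × String))) (sec : String) :
    (pvGroup l PySem.Dict.empty).getD sec [] = l.filter (fun ins => pvSec ins == sec) := by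
  have h := PySem.Dict.getD_foldl_modify_append (l.map (fun ins => (pvSec ins, ins)))
    PySem.Dict.empty sec
  simp only [List.foldl_map, List.filter_map, List.map_map, Function.comp_def] at h
  simpa [pvGroup] using h

lemma pvGroup_keys (l : List (List (String × String))) :
    (pvGroup l PySem.Dict.empty).keys = PySem.List.dedup (l.map pvSec) := by
  simp [pvGroup, PySem.Dict.keys_foldl_modify_key l pvSec ([]) (fun _ ins v => v ++ [ins]),
    PySem.List.dedup_eq_ofList, PySem.Set.update_nil_left]

lemma pvGroup_contains (l : List (List (String × String))) (sec : String) :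
    (pvGroup l PySem.Dict.empty).contains sec
      = !(l.filter (fun ins => pvSec ins == sec)).isEmpty := by
  rw [PySem.Dict.contains_eq_decide_mem_keys, pvGroup_keys]
  rcases h : (l.filter (fun ins => pvSec ins == sec)).isEmpty with _ | _
  · have : sec ∈ l.map pvSec := by
      rcases List.exists_mem_of_ne_nil _ (List.isEmpty_eq_false_iff.mp h) with ⟨ins, hins⟩
      have := List.mem_filter.mp hins
      exact List.mem_map.mpr ⟨ins, this.1, by simpa using this.2⟩
    simp [this]
  · simp only [List.isEmpty_iff, List.filter_eq_nil_iff] at h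
    have : sec ∉ l.map pvSec := by
      intro hm
      rcases List.mem_map.mp hm with ⟨ins, hins, he⟩
      exact h ins hins (by simp [he])
    simp [this]

-- ===== VERDICT (by name: the statement is the Claim_ definition above) =====
theorem render_playbook_spec : Claim_equal_render_playbook := by
  intro insights sections_order _ _
  unfold Spec_render_playbook render_playbook render_playbook_alt
  rw [show insights.foldl
      (fun (st : PySem.Dict String (List (List (String × String))) × List String) ins =>
        let sec := pvSec ins
        let st := if st.1.contains sec then st else (st.1.insert sec [], st.2 ++ [sec])
        (st.1.modify sec [] (· ++ [ins]), st.2))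
      (PySem.Dict.empty, []) = pvLoopA insights (PySem.Dict.empty, []) from rfl,
    pvLoopA_eq insights PySem.Dict.empty [] (by simp [PySem.Dict.keys_empty])]
  simp only [pvGroup_keys]
  have hstep : (fun (parts : List String) sec =>
      if (pvGroup insights PySem.Dict.empty).contains sec = true then
        parts ++ ["## " ++ sec] ++ ((pvGroup insights PySem.Dict.empty).getD sec []).map pvLine ++ [""]
      else parts)
    = (fun (parts : List String) sec =>
      let group := insights.filter (fun ins => pvSec ins == sec)
      if group.isEmpty then parts
      else parts ++ ["## " ++ sec] ++ group.map pvLine ++ [""]) := by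
    funext parts sec
    rw [pvGroup_contains, pvGroup_getD]
    cases h : (insights.filter (fun ins => pvSec ins == sec)).isEmpty <;> simp [h]
  rw [hstep]
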